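-- pv_equiv track=rewrite | github.com/4512yasir/codility-test-siscom-2025 | question_5.py | least_bribes
-- ===== SOURCE A (Python) =====
-- def least_bribes(bribes):
--     n =len(bribes)
--
--     dp = [[None] * n  for _ in range(n)]
--
--
--     def dfs(left,right):
--         if left > right:
--             return 0
--         if dp[left][right] is not None:
--             return dp[left][right]
--
--         min_cost = float('inf')
--
--         for k in range(left,right+1):
--             cost = bribes[k] + max(dfs(left,k-1),dfs(k+1,right))
--             min_cost =min(min_cost,cost)
--
--         dp[left][right] = min_cost
--         return min_cost
--
--     return dfs(0,n-1)
-- ===== SOURCE B (Python) =====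
-- def least_bribes(bribes):
--     n = len(bribes)
--     if n == 0:
--         return 0
--     dp = [[0] * n for _ in range(n)]
--     for L in range(n):
--         for left in range(n - L):
--             right = left + L
--             dp[left][right] = min(
--                 bribes[k] + max(dp[left][k - 1] if k > left else 0,
--                                 dp[k + 1][right] if k < right else 0)
--                 for k in range(left, right + 1))
--     return dp[0][n - 1]
-- ===== Notes on version B (the rewrite author's own statement) =====
-- stated objective: faster
-- what changed: Replaced the memoized top-down recursion (nested dfs with a None-initialized memo table and float('inf') accumulator) by bottom-up tabulation: fill dp[left][right] by increasing interval length with a min over split points, reading already-computed sub-interval cells.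
import Mathlib
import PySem

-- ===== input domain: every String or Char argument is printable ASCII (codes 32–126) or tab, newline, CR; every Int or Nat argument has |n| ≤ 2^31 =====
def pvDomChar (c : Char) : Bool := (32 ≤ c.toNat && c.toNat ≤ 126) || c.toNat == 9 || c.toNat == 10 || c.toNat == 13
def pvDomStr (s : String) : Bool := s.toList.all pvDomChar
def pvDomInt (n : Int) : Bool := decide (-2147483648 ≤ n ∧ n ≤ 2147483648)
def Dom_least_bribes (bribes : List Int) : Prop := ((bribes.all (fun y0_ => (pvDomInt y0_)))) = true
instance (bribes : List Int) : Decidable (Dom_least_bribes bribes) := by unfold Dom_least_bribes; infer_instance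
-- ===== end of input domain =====

-- B replaces A's memoized top-down recursion by a bottom-up interval-length tabulation
-- (objective: faster by a constant factor — no recursion/memo overhead, same O(n^3)).
-- A's memo table only caches values and never changes a result, so the port of A is the
-- underlying recursion, with fuel = len(bribes) (always sufficient: each call strictly
-- shrinks the interval) and Python's float('inf') seed modelled by an Option accumulator
-- (none = inf; the final value is always some, since the k-loop of a nonempty interval
-- runs at least once, so .getD 0 is never taken on a reachable empty interval result).

-- ===== PORT A =====
def pvDfsA (bribes : List Int) : Nat → Int → Int → Int
  | 0, _, _ => 0  -- fuel exhausted; unreachable when fuel ≥ interval size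
  | fuel+1, left, right =>
    if left > right then 0
    else
      ((PySem.List.pyRange left (right+1) 1).foldl
        (fun mc k =>
          let cost := (PySem.List.pyGet? bribes k).getD 0 +
            max (pvDfsA bribes fuel left (k-1)) (pvDfsA bribes fuel (k+1) right)
          some (match mc with
                | none => cost           -- min(inf, cost) = cost
                | some m => min m cost)) none).getD 0

def least_bribes (bribes : List Int) : Int :=
  pvDfsA bribes bribes.length 0 ((bribes.length : Int) - 1)

-- ===== PORT B =====
-- the dp matrix (a Python list of lists, written once per cell) is modelled as a
-- function Int → Int → Int updated pointwise
def pvBestB (bribes : List Int) (dp : Int → Int → Int) (left right : Int) : Int :=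
  (PySem.List.min? ((PySem.List.pyRange left (right+1) 1).map (fun k =>
      (PySem.List.pyGet? bribes k).getD 0 +
        max (if k > left then dp left (k-1) else 0)
            (if k < right then dp (k+1) right else 0))) (fun x => x)).getD 0

def least_bribes_alt (bribes : List Int) : Int :=
  let n : Int := bribes.length
  if n = 0 then 0
  else
    let dpFinal := (PySem.List.pyRange 0 n 1).foldl (fun dp L =>
      (PySem.List.pyRange 0 (n - L) 1).foldl (fun dp left =>
        let right := left + L
        fun i j => if i = left ∧ j = right then pvBestB bribes dp left right else dp i j) dp)
      (fun _ _ => (0 : Int))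
    dpFinal 0 (n-1)

-- ===== PRECONDITION & SPEC =====
def Spec_least_bribes (bribes : List Int) (out : Int) : Prop := out = least_bribes_alt bribes
instance (bribes : List Int) (out : Int) : Decidable (Spec_least_bribes bribes out) := by unfold Spec_least_bribes; infer_instance

-- ===== CLAIM (what is proved, stated in full; the proofs are below) =====
def Claim_equal_least_bribes : Prop := ∀ (bribes : List Int), Dom_least_bribes bribes → Spec_least_bribes bribes (least_bribes bribes)

-- ===== LEMMAS AND PROOFS =====

-- dfs of an empty interval is 0, whatever the fuel
theorem pvDfsA_empty (bribes : List Int) (f : Nat) (l r : Int) (h : r < l) :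
    pvDfsA bribes f l r = 0 := by
  cases f with
  | zero => rfl
  | succ f => simp [pvDfsA, h]

-- fuel irrelevance: any fuel ≥ the interval size gives the same value
theorem pvDfsA_irrel (bribes : List Int) :
    ∀ (f g : Nat) (l r : Int), r - l + 1 ≤ (f : Int) → r - l + 1 ≤ (g : Int) →
      pvDfsA bribes f l r = pvDfsA bribes g l r := by
  intro f
  induction f with
  | zero =>
    intro g l r hf _
    have hlr : r < l := by omega
    rw [pvDfsA_empty bribes 0 l r hlr, pvDfsA_empty bribes g l r hlr]
  | succ f ih =>
    intro g l r hf hg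
    by_cases hlr : l > r
    · rw [pvDfsA_empty bribes _ l r hlr, pvDfsA_empty bribes g l r hlr]
    · have hle : l ≤ r := by omega
      obtain ⟨g', rfl⟩ : ∃ g', g = g' + 1 := by
        cases g with
        | zero => exfalso; omega
        | succ g' => exact ⟨g', rfl⟩
      show pvDfsA bribes (f+1) l r = pvDfsA bribes (g'+1) l r
      simp only [pvDfsA, if_neg hlr]
      refine congrArg (fun o : Option Int => o.getD (0:Int)) ?_
      apply PySem.List.foldl_congr_mem
      intro acc k hk
      rw [PySem.List.mem_pyRange_one] at hk
      have h1 : pvDfsA bribes f l (k-1) = pvDfsA bribes g' l (k-1) := by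
        by_cases hk1 : k - 1 < l
        · rw [pvDfsA_empty bribes f l (k-1) hk1, pvDfsA_empty bribes g' l (k-1) hk1]
        · exact ih g' l (k-1) (by omega) (by omega)
      have h2 : pvDfsA bribes f (k+1) r = pvDfsA bribes g' (k+1) r := by
        by_cases hk2 : r < k + 1
        · rw [pvDfsA_empty bribes f (k+1) r hk2, pvDfsA_empty bribes g' (k+1) r hk2]
        · exact ih g' (k+1) r (by omega) (by omega)
      rw [h1, h2]

-- the canonical value of an interval: dfs with exactly enough fuel
def pvA (bribes : List Int) (l r : Int) : Int :=
  pvDfsA bribes (r - l + 1).toNat l r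

-- A's Option-min fold at accumulator `some a` is a plain running min
theorem pvOptMin_some (f : Int → Int) :
    ∀ (xs : List Int) (a : Int),
      xs.foldl (fun mc k => some (match mc with
        | none => f k
        | some m => min m (f k))) (some a)
      = some ((xs.map f).foldl min a) := by
  intro xs
  induction xs with
  | nil => intro a; rfl
  | cons x t ih => intro a; simpa using ih (min a (f x))

-- A's Option-min fold over a nonempty list equals Python's min of the mapped list
theorem pvOptMin_eq_min? (f : Int → Int) (x : Int) (t : List Int) :
    ((x :: t).foldl (fun mc k => some (match mc with
        | none => f k
        | some m => min m (f k))) none).getD 0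
      = (PySem.List.min? ((x :: t).map f) (fun y => y)).getD 0 := by
  simp only [List.foldl_cons, List.map_cons]
  rw [PySem.List.min?_id_cons, pvOptMin_some]

-- the crux: if dp is correct on all strictly smaller valid intervals, the tabulation's
-- cell formula computes the recursion's value
theorem pvBestB_correct (bribes : List Int) (dp : Int → Int → Int) (l r : Int)
    (hl : 0 ≤ l) (hlr : l ≤ r) (hr : r < (bribes.length : Int))
    (hdp : ∀ i j : Int, 0 ≤ i → i ≤ j → j < (bribes.length : Int) →
            j - i + 1 ≤ r - l → dp i j = pvA bribes i j) :
    pvBestB bribes dp l r = pvA bribes l r := by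
  obtain ⟨m, hm⟩ : ∃ m : Nat, (r - l + 1).toNat = m + 1 := by
    refine ⟨(r - l).toNat, by omega⟩
  have hmInt : (m : Int) = r - l := by omega
  unfold pvA pvBestB
  rw [hm]
  simp only [pvDfsA, if_neg (by omega : ¬ l > r)]
  have hcons : PySem.List.pyRange l (r+1) 1 = l :: PySem.List.pyRange (l+1) (r+1) 1 :=
    PySem.List.pyRange_one_cons (by omega)
  rw [hcons, ← pvOptMin_eq_min?
    (fun k => (PySem.List.pyGet? bribes k).getD 0 +
        max (if k > l then dp l (k-1) else 0)
            (if k < r then dp (k+1) r else 0)) l (PySem.List.pyRange (l+1) (r+1) 1), ← hcons]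
  refine congrArg (fun o : Option Int => o.getD (0:Int)) ?_
  apply PySem.List.foldl_congr_mem
  intro acc k hk
  rw [PySem.List.mem_pyRange_one] at hk
  have hleft : pvDfsA bribes m l (k-1) = (if k > l then dp l (k-1) else 0) := by
    by_cases hkl : k > l
    · rw [if_pos hkl]
      have := pvDfsA_irrel bribes m ((k-1) - l + 1).toNat l (k-1) (by omega) (by omega)
      rw [this, hdp l (k-1) hl (by omega) (by omega) (by omega)]
      rfl
    · rw [if_neg hkl, pvDfsA_empty bribes m l (k-1) (by omega)]
  have hright : pvDfsA bribes m (k+1) r = (if k < r then dp (k+1) r else 0) := by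
    by_cases hkr : k < r
    · rw [if_pos hkr]
      have := pvDfsA_irrel bribes m (r - (k+1) + 1).toNat (k+1) r (by omega) (by omega)
      rw [this, hdp (k+1) r (by omega) (by omega) hr (by omega)]
      rfl
    · rw [if_neg hkr, pvDfsA_empty bribes m (k+1) r (by omega)]
  simp only [hleft, hright]

-- the invariant carried through the tabulation: cells of all intervals of size ≤ L,
-- plus the cells of size L+1 already written in the current row (start index < b)
def pvInv (bribes : List Int) (L b : Int) (dp : Int → Int → Int) : Prop :=
  ∀ i j : Int, 0 ≤ i → i ≤ j → j < (bribes.length : Int) →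
    (j - i + 1 ≤ L ∨ (j - i + 1 = L + 1 ∧ i < b)) → dp i j = pvA bribes i j

-- inner loop (over left) preserves and completes the invariant for row L
theorem pvInner (bribes : List Int) (L : Int) (hL0 : 0 ≤ L) :
    ∀ (b : Int) (dp : Int → Int → Int), 0 ≤ b → b ≤ (bribes.length : Int) - L →
      pvInv bribes L b dp →
      pvInv bribes L ((bribes.length : Int) - L)
        ((PySem.List.pyRange b ((bribes.length : Int) - L) 1).foldl (fun dp left =>
          let right := left + L
          fun i j => if i = left ∧ j = right then pvBestB bribes dp left right else dp i j) dp) := by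
  intro b
  set n : Int := (bribes.length : Int) with hn
  intro dp hb0 hbn hinv
  by_cases hend : n - L ≤ b
  · rw [PySem.List.pyRange_one_eq_nil hend]
    intro i j h1 h2 h3 h4
    exact hinv i j h1 h2 h3 (by omega)
  · rw [PySem.List.pyRange_one_cons (by omega)]
    simp only [List.foldl_cons]
    have hdp' : pvInv bribes L (b+1)
        (fun i j => if i = b ∧ j = b + L then pvBestB bribes dp b (b+L) else dp i j) := by
      intro i j h1 h2 h3 h4
      show (if i = b ∧ j = b + L then pvBestB bribes dp b (b+L) else dp i j) = pvA bribes i j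
      by_cases hij : i = b ∧ j = b + L
      · rw [if_pos hij, hij.1, hij.2]
        exact pvBestB_correct bribes dp b (b+L) hb0 (by omega) (by omega)
          (fun i' j' g1 g2 g3 g4 => hinv i' j' g1 g2 g3 (by omega))
      · rw [if_neg hij]
        exact hinv i j h1 h2 h3 (by omega)
    exact pvInner bribes L hL0 (b+1) _ (by omega) (by omega) hdp'
termination_by b => ((bribes.length : Int) - L - b).toNat
decreasing_by omega

-- outer loop (over L): starting from a table correct for sizes ≤ a, fold up to row n
theorem pvOuter (bribes : List Int) :
    ∀ (a : Int) (dp : Int → Int → Int), 0 ≤ a → a ≤ (bribes.length : Int) →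
      pvInv bribes a 0 dp →
      pvInv bribes (bribes.length : Int) 0
        ((PySem.List.pyRange a (bribes.length : Int) 1).foldl (fun dp L =>
          (PySem.List.pyRange 0 ((bribes.length : Int) - L) 1).foldl (fun dp left =>
            let right := left + L
            fun i j => if i = left ∧ j = right then pvBestB bribes dp left right else dp i j) dp) dp) := by
  intro a
  set n : Int := (bribes.length : Int) with hn
  intro dp ha0 han hinv
  by_cases hend : n ≤ a
  · rw [PySem.List.pyRange_one_eq_nil hend]
    intro i j h1 h2 h3 h4
    exact hinv i j h1 h2 h3 (by omega)
  · rw [PySem.List.pyRange_one_cons (by omega)]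
    simp only [List.foldl_cons]
    have hrow := pvInner bribes a ha0 0 dp (by omega) (by omega)
      (fun i j g1 g2 g3 g4 => hinv i j g1 g2 g3 (by omega))
    have hnext : pvInv bribes (a+1) 0
        ((PySem.List.pyRange 0 (n - a) 1).foldl (fun dp left =>
          fun i j => if i = left ∧ j = left + a then pvBestB bribes dp left (left + a) else dp i j) dp) := by
      intro i j h1 h2 h3 h4
      exact hrow i j h1 h2 h3 (by omega)
    exact pvOuter bribes (a+1) _ (by omega) (by omega) hnext
termination_by a => ((bribes.length : Int) - a).toNat
decreasing_by omega

-- ===== VERDICT (by name: the statement is the Claim_ definition above) =====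
theorem least_bribes_spec : Claim_equal_least_bribes := by
  intro bribes _
  unfold Spec_least_bribes least_bribes least_bribes_alt
  set n : Int := (bribes.length : Int) with hn
  by_cases hn0 : n = 0
  · rw [if_pos hn0]
    rw [pvDfsA_empty bribes bribes.length 0 (n - 1) (by omega)]
  · rw [if_neg hn0]
    have hnpos : 0 < n := by positivity
    have hfinal := pvOuter bribes 0 (fun _ _ => (0 : Int)) le_rfl (by omega)
      (fun i j h1 h2 h3 h4 => by omega)
    have hcell := hfinal 0 (n-1) le_rfl (by omega) (by omega) (by omega)
    simp only [← hn] at hcell ⊢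
    rw [hcell]
    unfold pvA
    exact pvDfsA_irrel bribes bribes.length ((n - 1) - 0 + 1).toNat 0 (n-1) (by omega) (by omega)
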